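-- pv_equiv track=rewrite | github.com/Hmasrour/nursing-schedule-ai | app.py | calculer_stats
-- ===== SOURCE A (Python) =====
-- HEURES_PAR_GARDE = {"M": 10, "N": 10, "R": 0, "C": 0}
--
-- def calculer_stats(gardes):
--     heures = sum(HEURES_PAR_GARDE.get(g, 0) for g in gardes)
--     nuits  = gardes.count("N")
--     max_nuits_consecutives = 0
--     streak = 0
--     for g in gardes:
--         if g == "N":
--             streak += 1
--             if streak > max_nuits_consecutives:
--                 max_nuits_consecutives = streak
--         else:
--             streak = 0
--     alertes = []
--     if heures > 60: alertes.append("⚠ Heures sup")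
--     if max_nuits_consecutives >= 3:  alertes.append("⚠ 3+ nuits consécutives")
--     return heures, nuits, alertes
-- ===== SOURCE B (Python) =====
-- HEURES_PAR_GARDE = {"M": 10, "N": 10, "R": 0, "C": 0}
--
-- def _n_runs(gardes):
--     # lengths of the maximal blocks of consecutive "N"
--     runs = []
--     i = 0
--     while i < len(gardes):
--         if gardes[i] == "N":
--             j = i + 1
--             while j < len(gardes) and gardes[j] == "N":
--                 j += 1
--             runs.append(j - i)
--             i = j
--         else:
--             i += 1
--     return runs
--
-- def calculer_stats(gardes):
--     runs = _n_runs(gardes)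
--     nuits = sum(runs)
--     heures = 10 * (gardes.count("M") + nuits)
--     max_nuits = max(runs, default=0)
--     alertes = []
--     if heures > 60:
--         alertes.append("⚠ Heures sup")
--     if max_nuits >= 3:
--         alertes.append("⚠ 3+ nuits consécutives")
--     return heures, nuits, alertes
-- ===== Notes on version B (the rewrite author's own statement) =====
-- stated objective: alternative
-- what changed: Replaces A's three scans (dict-lookup sum, count, streak/running-max state machine) by extracting the lengths of maximal 'N'-runs once, then deriving nuits as their sum, heures as 10*(count('M')+nuits) from the constant table, and the consecutive-nights maximum as max(runs, default=0).
import Mathlib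
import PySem

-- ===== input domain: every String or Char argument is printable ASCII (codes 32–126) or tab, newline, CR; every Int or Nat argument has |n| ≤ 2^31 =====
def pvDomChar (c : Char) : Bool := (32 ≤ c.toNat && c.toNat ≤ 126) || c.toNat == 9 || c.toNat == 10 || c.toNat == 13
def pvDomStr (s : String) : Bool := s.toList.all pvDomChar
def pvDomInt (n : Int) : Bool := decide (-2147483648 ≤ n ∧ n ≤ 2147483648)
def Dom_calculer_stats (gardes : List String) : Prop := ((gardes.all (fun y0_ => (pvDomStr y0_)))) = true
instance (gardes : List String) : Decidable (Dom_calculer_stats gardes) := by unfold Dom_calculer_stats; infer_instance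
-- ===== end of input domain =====

-- B replaces A's three scans by extracting the maximal 'N'-run lengths once and deriving
-- the totals and the consecutive-nights maximum from them (alternative decomposition, same cost).


-- ===== PORT A =====
def HEURES_PAR_GARDE : PySem.Dict String Int :=
  PySem.Dict.ofList [("M", 10), ("N", 10), ("R", 0), ("C", 0)]

def calculer_stats (gardes : List String) : Int × Int × List String :=
  let heures := gardes.foldl (fun acc g => acc + HEURES_PAR_GARDE.getD g 0) 0
  let nuits : Int := (PySem.List.count gardes "N" : Int)
  -- for g in gardes: streak machine over the pair (max_nuits_consecutives, streak)
  let ms := gardes.foldl (fun (p : Int × Int) g =>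
      if g == "N" then
        let s := p.2 + 1
        (if s > p.1 then s else p.1, s)
      else (p.1, 0)) (0, 0)
  let alertes : List String :=
    (if heures > 60 then [] ++ ["⚠ Heures sup"] else []) ++
    (if ms.1 ≥ 3 then ["⚠ 3+ nuits consécutives"] else [])
  (heures, nuits, alertes)

-- ===== PORT B =====
-- _n_runs: outer while advances either past a maximal "N"-block or by one element
def nRuns (l : List String) : List Int :=
  match l with
  | [] => []
  | g :: rest =>
    if g == "N" then
      let k := (rest.takeWhile (fun x => x == "N")).length
      ((k : Int) + 1) :: nRuns (rest.dropWhile (fun x => x == "N"))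
    else nRuns rest
termination_by l.length
decreasing_by
  · simp only [List.length_cons]
    exact Nat.lt_succ_of_le (List.length_dropWhile_le _ _)
  · simp

def calculer_stats_alt (gardes : List String) : Int × Int × List String :=
  let runs := nRuns gardes
  let nuits := runs.sum
  let heures := 10 * ((PySem.List.count gardes "M" : Int) + nuits)
  let max_nuits := PySem.List.maxD runs (fun x => x) 0
  let alertes : List String :=
    (if heures > 60 then [] ++ ["⚠ Heures sup"] else []) ++
    (if max_nuits ≥ 3 then ["⚠ 3+ nuits consécutives"] else [])
  (heures, nuits, alertes)

-- ===== PRECONDITION & SPEC =====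
def Spec_calculer_stats (gardes : List String) (out : Int × Int × List String) : Prop := out = calculer_stats_alt gardes
instance (gardes : List String) (out : Int × Int × List String) : Decidable (Spec_calculer_stats gardes out) := by unfold Spec_calculer_stats; infer_instance

-- ===== CLAIM (what is proved, stated in full; the proofs are below) =====
def Claim_equal_calculer_stats : Prop := ∀ (gardes : List String), Dom_calculer_stats gardes → Spec_calculer_stats gardes (calculer_stats gardes)

-- ===== LEMMAS AND PROOFS =====

lemma nRuns_cons_N (g : String) (rest : List String) (h : (g == "N") = true) :
    nRuns (g :: rest) = (((rest.takeWhile (fun x => x == "N")).length : Int) + 1)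
      :: nRuns (rest.dropWhile (fun x => x == "N")) := by
  simp [nRuns, h]

lemma nRuns_cons_ne (g : String) (rest : List String) (h : (g == "N") = false) :
    nRuns (g :: rest) = nRuns rest := by
  simp [nRuns, h]

lemma nRuns_nonneg (l : List String) : ∀ r ∈ nRuns l, (0:Int) ≤ r := by
  induction l using nRuns.induct with
  | case1 => simp [nRuns]
  | case2 g rest h ih =>
    rw [nRuns_cons_N g rest h]
    intro r hr
    rcases List.mem_cons.1 hr with h1 | h1
    · subst h1; positivity
    · exact ih r h1
  | case3 g rest h ih =>
    rw [nRuns_cons_ne g rest (by simpa using h)]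
    exact ih

lemma count_takeWhileN (l : List String) :
    (List.count "N" (l.takeWhile (fun x => x == "N"))) = (l.takeWhile (fun x => x == "N")).length := by
  rw [List.count_eq_length]
  intro b hb
  have h2 := List.mem_takeWhile_imp hb
  simp only [beq_iff_eq] at h2
  exact h2.symm

lemma sum_nRuns (l : List String) : (nRuns l).sum = (PySem.List.count l "N" : Int) := by
  induction l using nRuns.induct with
  | case1 => simp [nRuns, PySem.List.count]
  | case2 g rest h ih =>
    have hg : g = "N" := beq_iff_eq.mp h
    subst hg
    have hsplit : List.count "N" rest =
        List.count "N" (rest.takeWhile (fun x => x == "N")) + List.count "N" (rest.dropWhile (fun x => x == "N")) := by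
      conv_lhs => rw [← List.takeWhile_append_dropWhile (p := fun x => x == "N") (l := rest)]
      rw [List.count_append]
    rw [nRuns_cons_N _ rest h, List.sum_cons, ih]
    simp only [PySem.List.count, List.count_cons_self]
    rw [hsplit, count_takeWhileN]
    push_cast
    ring
  | case3 g rest h ih =>
    have hg : (g == "N") = false := by simpa using h
    rw [nRuns_cons_ne g rest hg, ih]
    simp [PySem.List.count, List.count_cons, hg]

lemma maxD_cons (a : Int) (t : List Int) :
    PySem.List.maxD (a :: t) (fun y => y) 0 = t.foldl max a := by
  simp [PySem.List.maxD, PySem.List.max?_id_cons]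

lemma foldl_max_maxD (t : List Int) : ∀ x : Int, 0 ≤ x → (∀ y ∈ t, (0:Int) ≤ y) →
    t.foldl max x = max x (PySem.List.maxD t (fun y => y) 0) := by
  induction t with
  | nil =>
    intro x hx _
    simp [PySem.List.maxD, PySem.List.max?, max_eq_left hx]
  | cons a t ih =>
    intro x hx hall
    have ha : (0:Int) ≤ a := hall a (by simp)
    have ht : ∀ y ∈ t, (0:Int) ≤ y := fun y hy => hall y (by simp [hy])
    have hD : PySem.List.maxD (a :: t) (fun y => y) 0 = max a (PySem.List.maxD t (fun y => y) 0) := by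
      rw [maxD_cons, ih a ha ht]
    rw [List.foldl_cons, ih (max x a) (le_trans hx (le_max_left x a)) ht, hD]
    omega

lemma maxD_cons' (a : Int) (t : List Int) (ha : 0 ≤ a) (ht : ∀ y ∈ t, (0:Int) ≤ y) :
    PySem.List.maxD (a :: t) (fun y => y) 0 = max a (PySem.List.maxD t (fun y => y) 0) := by
  rw [maxD_cons, foldl_max_maxD t a ha ht]

def MXn (l : List String) : Int := PySem.List.maxD (nRuns l) (fun x => x) 0

def headN (l : List String) : Int := ((l.takeWhile (fun x => x == "N")).length : Int)
def dropN (l : List String) : List String := l.dropWhile (fun x => x == "N")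

lemma headN_nonneg (l : List String) : 0 ≤ headN l := by
  simp [headN]

lemma MXn_nonneg (l : List String) : 0 ≤ MXn l := by
  unfold MXn
  cases hr : nRuns l with
  | nil => simp [PySem.List.maxD, PySem.List.max?]
  | cons a t =>
    have ha : (0:Int) ≤ a := nRuns_nonneg l a (by simp [hr])
    have ht : ∀ y ∈ t, (0:Int) ≤ y := fun y hy => nRuns_nonneg l y (by simp [hr, hy])
    rw [maxD_cons' a t ha ht]
    omega

lemma headN_cons_N (g : String) (rest : List String) (hg : (g == "N") = true) :
    headN (g :: rest) = headN rest + 1 := by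
  simp [headN, hg]

lemma dropN_cons_N (g : String) (rest : List String) (hg : (g == "N") = true) :
    dropN (g :: rest) = dropN rest := by
  simp [dropN, hg]

lemma headN_cons_ne (g : String) (rest : List String) (hg : (g == "N") = false) :
    headN (g :: rest) = 0 := by
  simp [headN, hg]

lemma dropN_cons_ne (g : String) (rest : List String) (hg : (g == "N") = false) :
    dropN (g :: rest) = g :: rest := by
  simp [dropN, hg]

lemma MXn_decomp (l : List String) : MXn l = max (headN l) (MXn (dropN l)) := by
  cases l with
  | nil => simp [MXn, headN, dropN, nRuns, PySem.List.maxD, PySem.List.max?]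
  | cons g rest =>
    by_cases hg : (g == "N") = true
    · have h1 : nRuns (g :: rest) = (((rest.takeWhile (fun x => x == "N")).length : Int) + 1)
        :: nRuns (rest.dropWhile (fun x => x == "N")) := nRuns_cons_N g rest hg
      have ha : (0:Int) ≤ ((rest.takeWhile (fun x => x == "N")).length : Int) + 1 := by positivity
      have ht : ∀ y ∈ nRuns (rest.dropWhile (fun x => x == "N")), (0:Int) ≤ y :=
        nRuns_nonneg _
      rw [MXn, h1, maxD_cons' _ _ ha ht, headN_cons_N g rest hg, dropN_cons_N g rest hg]
      have : headN rest + 1 = ((rest.takeWhile (fun x => x == "N")).length : Int) + 1 := by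
        simp [headN]
      rw [← this]
      rfl
    · have hg' : (g == "N") = false := by simpa using hg
      rw [headN_cons_ne g rest hg', dropN_cons_ne g rest hg']
      have := MXn_nonneg (g :: rest)
      omega

lemma loop_max (l : List String) : ∀ maxv streak : Int, 0 ≤ streak → streak ≤ maxv →
    (l.foldl (fun (p : Int × Int) g =>
      if g == "N" then
        let s := p.2 + 1
        (if s > p.1 then s else p.1, s)
      else (p.1, 0)) (maxv, streak)).1
    = max maxv (max (streak + headN l) (MXn (dropN l))) := by
  induction l with
  | nil =>
    intro maxv streak h0 hm
    have h1 : headN ([] : List String) = 0 := by simp [headN]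
    have h2 : MXn (dropN ([] : List String)) = 0 := by
      simp [MXn, dropN, nRuns, PySem.List.maxD, PySem.List.max?]
    simp only [List.foldl_nil, h1, h2]
    omega
  | cons g rest ih =>
    intro maxv streak h0 hm
    by_cases hg : (g == "N") = true
    · rw [List.foldl_cons]
      simp only [hg, if_true]
      have hstep : (if streak + 1 > maxv then streak + 1 else maxv) = max maxv (streak + 1) := by
        split_ifs <;> omega
      have hstep2 : ((if streak + 1 > maxv then streak + 1 else maxv, streak + 1) : Int × Int)
          = (max maxv (streak + 1), streak + 1) := by rw [hstep]
      rw [hstep2, ih (max maxv (streak + 1)) (streak + 1) (by omega) (le_max_right _ _),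
          headN_cons_N g rest hg, dropN_cons_N g rest hg]
      have hh := headN_nonneg rest
      omega
    · have hg' : (g == "N") = false := by simpa using hg
      rw [List.foldl_cons]
      simp only [hg', Bool.false_eq_true, if_false]
      rw [ih maxv 0 le_rfl (by omega), headN_cons_ne g rest hg', dropN_cons_ne g rest hg']
      have hd : max (0 + headN rest) (MXn (dropN rest)) = MXn rest := by
        have := MXn_decomp rest
        omega
      have hd2 : MXn (g :: rest) = MXn rest := by
        rw [MXn, nRuns_cons_ne g rest hg', ← MXn]
      have hmn := MXn_nonneg rest
      omega

lemma streak_machine (l : List String) :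
    (l.foldl (fun (p : Int × Int) g =>
      if g == "N" then
        let s := p.2 + 1
        (if s > p.1 then s else p.1, s)
      else (p.1, 0)) (0, 0)).1 = MXn l := by
  rw [loop_max l 0 0 le_rfl le_rfl]
  have := MXn_decomp l
  have := MXn_nonneg l
  have := headN_nonneg l
  have := MXn_nonneg (dropN l)
  omega

lemma hget (g : String) : HEURES_PAR_GARDE.getD g 0
    = (if g = "M" then (10:Int) else 0) + (if g = "N" then 10 else 0) := by
  by_cases h1 : g = "M"
  · subst h1; decide
  by_cases h2 : g = "N"
  · subst h2; decide
  have hitems : HEURES_PAR_GARDE.items = [("M",(10:Int)),("N",10),("R",0),("C",0)] := by decide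
  have b1 : ("M" == g) = false := beq_eq_false_iff_ne.mpr (Ne.symm h1)
  have b2 : ("N" == g) = false := beq_eq_false_iff_ne.mpr (Ne.symm h2)
  simp only [PySem.Dict.getD, PySem.Dict.get?, hitems]
  cases hR : ("R" == g) <;> cases hC : ("C" == g) <;>
    simp [List.find?, b1, b2, hR, hC, h1, h2]

lemma heures_eq (l : List String) : ∀ acc : Int,
    l.foldl (fun acc g => acc + HEURES_PAR_GARDE.getD g 0) acc
    = acc + 10 * (PySem.List.count l "M" : Int) + 10 * (PySem.List.count l "N" : Int) := by
  induction l with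
  | nil => intro acc; simp [PySem.List.count]
  | cons g rest ih =>
    intro acc
    rw [List.foldl_cons, ih, hget g]
    simp only [PySem.List.count, List.count_cons]
    by_cases h1 : g = "M" <;> by_cases h2 : g = "N"
    · subst h1; exact absurd h2 (by decide)
    all_goals first
      | (simp [h1, h2]; push_cast; ring)
      | (simp [h1, h2])

-- ===== VERDICT (by name: the statement is the Claim_ definition above) =====
theorem calculer_stats_spec : Claim_equal_calculer_stats := by
  intro gardes _
  unfold Spec_calculer_stats
  show calculer_stats gardes = calculer_stats_alt gardes
  simp only [calculer_stats, calculer_stats_alt]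
  rw [heures_eq gardes 0, streak_machine gardes, sum_nRuns gardes]
  have h10 : (0:Int) + 10 * (PySem.List.count gardes "M" : Int) + 10 * (PySem.List.count gardes "N" : Int)
      = 10 * ((PySem.List.count gardes "M" : Int) + (PySem.List.count gardes "N" : Int)) := by ring
  rw [h10, MXn]
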